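-- pv_equiv track=rewrite | github.com/JakubBraz/adventOfCode2023 | day02.py | max_cubes
-- ===== SOURCE A (Python) =====
-- def max_cubes(games):
--     result = []
--     for subgame in games:
--         m = [0, 0, 0]
--         for r, g, b in subgame:
--             m = [max(m[0], r), max(m[1], g), max(m[2], b)]
--         result.append(m)
--     return result
-- ===== SOURCE B (Python) =====
-- def max_cubes(games):
--     # Column-oriented: seed a (0,0,0) row, transpose with zip, take each column's max.
--     return [[max(col) for col in zip((0, 0, 0), *sub)] for sub in games]
-- ===== Notes on version B (the rewrite author's own statement) =====
-- stated objective: idiomatic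
-- what changed: Replaces the row-by-row accumulator fold over a rebuilt 3-list with a column-oriented pass: seed a (0,0,0) row, transpose via zip(*...), and take max of each column (one max() call per column instead of a fresh 3-list per row).
import Mathlib
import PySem

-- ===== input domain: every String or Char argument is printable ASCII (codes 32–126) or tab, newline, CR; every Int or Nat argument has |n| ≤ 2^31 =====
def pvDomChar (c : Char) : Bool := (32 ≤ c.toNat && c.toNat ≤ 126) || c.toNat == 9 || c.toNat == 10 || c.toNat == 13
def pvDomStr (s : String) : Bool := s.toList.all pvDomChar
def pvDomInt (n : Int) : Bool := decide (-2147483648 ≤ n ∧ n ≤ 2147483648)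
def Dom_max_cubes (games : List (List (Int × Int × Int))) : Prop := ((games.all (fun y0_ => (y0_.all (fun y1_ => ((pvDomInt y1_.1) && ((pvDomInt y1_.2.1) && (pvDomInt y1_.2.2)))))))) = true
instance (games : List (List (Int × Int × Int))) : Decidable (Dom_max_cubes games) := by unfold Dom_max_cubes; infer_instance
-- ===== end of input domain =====

-- B replaces A's row-by-row accumulator fold with a column-oriented pass (seed row + per-column max); objective: idiomatic.

-- ===== PORT A =====
-- A: result accumulator; per subgame fold a 3-element list m, updating each slot with max.
def max_cubes (games : List (List (Int × Int × Int))) : List (List Int) :=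
  games.foldl
    (fun result subgame =>
      let m := subgame.foldl
        (fun m rgb => [max (m.getD 0 0) rgb.1, max (m.getD 1 0) rgb.2.1, max (m.getD 2 0) rgb.2.2])
        [0, 0, 0]
      result ++ [m])
    []

-- ===== PORT B =====
-- Python max over the nonempty column (seed :: entries)
def pyColMax (seed : Int) (col : List Int) : Int := col.foldl max seed
def max_cubes_alt (games : List (List (Int × Int × Int))) : List (List Int) :=
  games.map (fun sub =>
    [pyColMax 0 (sub.map (·.1)), pyColMax 0 (sub.map (·.2.1)), pyColMax 0 (sub.map (·.2.2))])

-- ===== PRECONDITION & SPEC =====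
def Spec_max_cubes (games : List (List (Int × Int × Int))) (out : List (List Int)) : Prop := out = max_cubes_alt games
instance (games : List (List (Int × Int × Int))) (out : List (List Int)) : Decidable (Spec_max_cubes games out) := by unfold Spec_max_cubes; infer_instance

-- ===== CLAIM (what is proved, stated in full; the proofs are below) =====
def Claim_equal_max_cubes : Prop := ∀ (games : List (List (Int × Int × Int))), Dom_max_cubes games → Spec_max_cubes games (max_cubes games)

-- ===== LEMMAS AND PROOFS =====
theorem inner_fold_eq (sub : List (Int × Int × Int)) : ∀ (a b c : Int),
    sub.foldl (fun m rgb => [max (m.getD 0 0) rgb.1, max (m.getD 1 0) rgb.2.1, max (m.getD 2 0) rgb.2.2]) [a, b, c]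
      = [pyColMax a (sub.map (·.1)), pyColMax b (sub.map (·.2.1)), pyColMax c (sub.map (·.2.2))] := by
  induction sub with
  | nil => intro a b c; simp [pyColMax]
  | cons h t ih => intro a b c; simp only [List.foldl_cons, List.map_cons, List.getD, pyColMax] at *; exact ih _ _ _

theorem foldl_append_eq_map (games : List (List (Int × Int × Int))) : ∀ (acc : List (List Int)),
    games.foldl
      (fun result subgame =>
        result ++ [subgame.foldl
          (fun m rgb => [max (m.getD 0 0) rgb.1, max (m.getD 1 0) rgb.2.1, max (m.getD 2 0) rgb.2.2]) [0, 0, 0]])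
      acc = acc ++ max_cubes_alt games := by
  induction games with
  | nil => intro acc; simp [max_cubes_alt]
  | cons g t ih =>
      intro acc
      rw [List.foldl_cons, inner_fold_eq, ih]
      simp [max_cubes_alt]

-- ===== VERDICT (by name: the statement is the Claim_ definition above) =====
theorem max_cubes_spec : Claim_equal_max_cubes := by
  intro games _
  unfold Spec_max_cubes max_cubes
  simpa using foldl_append_eq_map games []
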